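-- pv_equiv track=rewrite | github.com/gunvirranu/mini-code | mini-rsa/mini_rsa.py | de_block
-- ===== SOURCE A (Python) =====
-- def de_block(blocks, bsize):
--     data = []
--     for block in blocks:
--         tmp = [0] * (bsize)
--         for k in range(bsize):
--             block, tmp[bsize-k-1] = divmod(block, 127)
--         data.extend(tmp)
--     return data
-- ===== SOURCE B (Python) =====
-- def de_block(blocks, bsize):
--     # The running quotient of repeated divmod(_, 127) stabilises at 0 (nonnegative
--     # block) or -1 (negative block) after ~log127|block| steps, and from then on
--     # every digit is 0 resp. 126.  So extract low digits only until it stabilises,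
--     # emit the remaining high digits as one closed-form run, no per-digit loop.
--     data = []
--     for block in blocks:
--         low = []
--         while len(low) < bsize and block != 0 and block != -1:
--             block, d = divmod(block, 127)
--             low.append(d)
--         data += [0 if block == 0 else 126] * (bsize - len(low))
--         data += reversed(low)
--     return data
-- ===== Notes on version B (the rewrite author's own statement) =====
-- stated objective: faster
-- what changed: Instead of running divmod bsize times per block into a buffer filled back-to-front, B runs divmod only until the quotient stabilises at 0 or -1 (about log127|block| steps) and emits the remaining high digits as one closed-form run of 0s resp. 126s.
import Mathlib
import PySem

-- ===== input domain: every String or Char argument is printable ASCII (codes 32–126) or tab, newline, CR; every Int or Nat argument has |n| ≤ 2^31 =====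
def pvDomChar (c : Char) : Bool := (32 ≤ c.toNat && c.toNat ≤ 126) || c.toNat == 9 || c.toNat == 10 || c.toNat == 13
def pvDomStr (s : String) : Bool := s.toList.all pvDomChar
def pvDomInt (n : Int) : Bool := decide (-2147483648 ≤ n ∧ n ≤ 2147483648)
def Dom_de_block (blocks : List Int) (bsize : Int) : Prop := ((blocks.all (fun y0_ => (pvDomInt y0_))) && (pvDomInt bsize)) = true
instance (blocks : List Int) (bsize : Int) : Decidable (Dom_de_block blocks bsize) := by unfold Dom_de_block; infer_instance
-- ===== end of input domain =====

-- B replaces A's fixed-count divmod loop into a reversed buffer by an early-exit divmod loop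
-- that stops once the quotient stabilises at 0 or -1 and emits the remaining digits as one
-- closed-form run of 0s resp. 126s (objective: faster, measured).

-- ===== PORT A =====
def de_block (blocks : List Int) (bsize : Int) : List Int :=
  blocks.foldl (fun data block =>
    -- tmp = [0] * bsize  ([] when bsize ≤ 0, exactly as in Python)
    let tmp : List Int := List.replicate bsize.toNat 0
    -- for k in range(bsize): block, tmp[bsize-k-1] = divmod(block, 127)
    -- (index bsize-k-1 is nonnegative and in range for every k in range(bsize), so .toNat is exact)
    let st := (PySem.List.pyRange 0 bsize 1).foldl
      (fun (st : Int × List Int) k =>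
        (PySem.Int.floordiv st.1 127, st.2.set (bsize - k - 1).toNat (PySem.Int.mod st.1 127)))
      (block, tmp)
    data ++ st.2) []

-- ===== PORT B =====
-- while len(low) < bsize and block != 0 and block != -1: block, d = divmod(block, 127); low.append(d)
-- (recursion on the remaining count bsize - len(low); returns (low, final block))
def lowLoopB : Int → Nat → List Int × Int
  | b, 0 => ([], b)
  | b, Nat.succ n =>
    if b = 0 ∨ b = -1 then ([], b)
    else
      let p := lowLoopB (PySem.Int.floordiv b 127) n
      (PySem.Int.mod b 127 :: p.1, p.2)

def de_block_alt (blocks : List Int) (bsize : Int) : List Int :=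
  blocks.foldl (fun data block =>
    let p := lowLoopB block bsize.toNat
    -- data += [0 if block == 0 else 126] * (bsize - len(low)); data += reversed(low)
    -- (a Python list times a negative count is [], exactly .toNat's clamp)
    data ++ (List.replicate (bsize - (p.1.length : Int)).toNat (if p.2 = 0 then 0 else 126)
             ++ p.1.reverse)) []

-- ===== PRECONDITION & SPEC =====
def Spec_de_block (blocks : List Int) (bsize : Int) (out : List Int) : Prop := out = de_block_alt blocks bsize
instance (blocks : List Int) (bsize : Int) (out : List Int) : Decidable (Spec_de_block blocks bsize out) := by unfold Spec_de_block; infer_instance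

-- ===== CLAIM (what is proved, stated in full; the proofs are below) =====
def Claim_equal_de_block : Prop := ∀ (blocks : List Int) (bsize : Int), Dom_de_block blocks bsize → Spec_de_block blocks bsize (de_block blocks bsize)

-- ===== LEMMAS AND PROOFS =====

-- the list A's inner loop leaves in tmp, written as a recursion: last digit appended after
-- the digits of the quotient
def digitsRec : Nat → Int → List Int
  | 0, _ => []
  | n+1, b => digitsRec n (PySem.Int.floordiv b 127) ++ [PySem.Int.mod b 127]

-- A's inner step never touches the appended last cell once it is out of range
lemma fold_app (n : Nat) (ks : List Nat) (h : ∀ k ∈ ks, ((n : Int) - k - 1).toNat < n) :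
    ∀ (b : Int) (u : List Int) (r : Int), u.length = n →
    ks.foldl (fun (st : Int × List Int) (k : Nat) =>
        (PySem.Int.floordiv st.1 127, st.2.set ((n : Int) - k - 1).toNat (PySem.Int.mod st.1 127)))
      (b, u ++ [r])
    = ((ks.foldl (fun (st : Int × List Int) (k : Nat) =>
        (PySem.Int.floordiv st.1 127, st.2.set ((n : Int) - k - 1).toNat (PySem.Int.mod st.1 127)))
      (b, u)).1,
       (ks.foldl (fun (st : Int × List Int) (k : Nat) =>
        (PySem.Int.floordiv st.1 127, st.2.set ((n : Int) - k - 1).toNat (PySem.Int.mod st.1 127)))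
      (b, u)).2 ++ [r]) := by
  induction ks with
  | nil => intro b u r hu; rfl
  | cons k ks ih =>
    intro b u r hu
    have hk : ((n : Int) - k - 1).toNat < n := h k (List.mem_cons_self ..)
    have hset : (u ++ [r]).set ((n : Int) - k - 1).toNat (PySem.Int.mod b 127)
        = u.set ((n : Int) - k - 1).toNat (PySem.Int.mod b 127) ++ [r] := by
      rw [List.set_append]
      simp only [hu]
      rw [if_pos hk]
    simp only [List.foldl_cons, hset]
    exact ih (fun k hk => h k (List.mem_cons_of_mem _ hk)) _ _ _ (by simp [hu])

-- A's inner loop computes digitsRec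
lemma inner_loop (n : Nat) : ∀ (b : Int) (t : List Int), t.length = n →
    ((List.range n).foldl (fun (st : Int × List Int) (k : Nat) =>
        (PySem.Int.floordiv st.1 127, st.2.set ((n : Int) - k - 1).toNat (PySem.Int.mod st.1 127)))
      (b, t)).2 = digitsRec n b := by
  induction n with
  | zero => intro b t ht; simp [digitsRec, List.length_eq_zero_iff.mp ht]
  | succ n ih =>
    intro b t ht
    rw [List.range_succ_eq_map]
    simp only [List.foldl_cons, List.foldl_map]
    have hidx0 : (((n : Nat) + 1 : Int) - (0 : Nat) - 1).toNat = n := by omega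
    have hfun : (fun (st : Int × List Int) (k : Nat) =>
        (PySem.Int.floordiv st.1 127, st.2.set (((n + 1 : Nat) : Int) - (k + 1) - 1).toNat (PySem.Int.mod st.1 127)))
        = (fun (st : Int × List Int) (k : Nat) =>
        (PySem.Int.floordiv st.1 127, st.2.set (((n : Nat) : Int) - k - 1).toNat (PySem.Int.mod st.1 127))) := by
      funext st k
      congr 2
      omega
    have hset : t.set (((n : Nat) + 1 : Int) - ((0 : Nat) : Int) - 1).toNat (PySem.Int.mod b 127)
        = t.take n ++ [PySem.Int.mod b 127] := by
      have : (((n : Nat) + 1 : Int) - ((0 : Nat) : Int) - 1).toNat = n := by omega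
      rw [this, List.set_eq_take_append_cons_drop, if_pos (by omega)]
      rw [List.drop_eq_nil_of_le (by omega)]
    push_cast
    push_cast at hfun hset
    rw [hset, hfun,
      fold_app n (List.range n) (fun k hk => by have := List.mem_range.mp hk; omega)
        (PySem.Int.floordiv b 127) (t.take n) (PySem.Int.mod b 127) (by simp; omega)]
    simp only [digitsRec]
    rw [ih (PySem.Int.floordiv b 127) (t.take n) (by simp; omega)]

-- A's inner loop leaves digitsRec bsize.toNat block in tmp
lemma tmp_eq_digitsRec (bsize block : Int) :
    ((PySem.List.pyRange 0 bsize 1).foldl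
      (fun (st : Int × List Int) k =>
        (PySem.Int.floordiv st.1 127, st.2.set (bsize - k - 1).toNat (PySem.Int.mod st.1 127)))
      (block, List.replicate bsize.toNat 0)).2 = digitsRec bsize.toNat block := by
  by_cases hb : bsize ≤ 0
  · rw [PySem.List.pyRange_one_eq_nil hb]
    simp [show bsize.toNat = 0 by omega, digitsRec]
  · rw [PySem.List.pyRange_one]
    simp only [List.foldl_map, Int.sub_zero]
    have h1 : (fun (x : Int × List Int) (y : Nat) =>
        (PySem.Int.floordiv x.1 127, x.2.set (bsize - (0 + (y : Int)) - 1).toNat (PySem.Int.mod x.1 127)))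
        = fun (x : Int × List Int) (y : Nat) =>
        (PySem.Int.floordiv x.1 127, x.2.set ((bsize.toNat : Int) - y - 1).toNat (PySem.Int.mod x.1 127)) := by
      funext x y
      congr 2
      omega
    rw [h1, inner_loop bsize.toNat block _ (by simp)]

-- B's while loop extracts at most its fuel many digits
lemma lowLoopB_length_le (n : Nat) : ∀ b : Int, (lowLoopB b n).1.length ≤ n := by
  induction n with
  | zero => intro b; simp [lowLoopB]
  | succ n ih =>
    intro b
    rw [lowLoopB]
    split
    · simp
    · simpa using Nat.succ_le_succ (ih (PySem.Int.floordiv b 127))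

-- once the running quotient is 0 every remaining digit is 0
lemma digitsRec_zero (n : Nat) : digitsRec n 0 = List.replicate n 0 := by
  induction n with
  | zero => rfl
  | succ n ih =>
    rw [digitsRec, show PySem.Int.floordiv 0 127 = 0 from by decide,
        show PySem.Int.mod 0 127 = 0 from by decide, ih, List.replicate_succ']

-- once the running quotient is -1 every remaining digit is 126
lemma digitsRec_neg_one (n : Nat) : digitsRec n (-1) = List.replicate n 126 := by
  induction n with
  | zero => rfl
  | succ n ih =>
    rw [digitsRec, show PySem.Int.floordiv (-1) 127 = -1 from by decide,
        show PySem.Int.mod (-1) 127 = 126 from by decide, ih, List.replicate_succ']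

-- A's digit list is B's closed-form run followed by B's reversed low digits
lemma digitsRec_eq_lowLoopB (n : Nat) : ∀ b : Int,
    digitsRec n b = List.replicate (n - (lowLoopB b n).1.length)
        (if (lowLoopB b n).2 = 0 then 0 else 126) ++ (lowLoopB b n).1.reverse := by
  induction n with
  | zero => intro b; simp [digitsRec, lowLoopB]
  | succ n ih =>
    intro b
    rw [lowLoopB]
    split
    · rename_i h
      rcases h with h | h <;> subst h
      · simp [digitsRec_zero]
      · norm_num [digitsRec_neg_one]
    · rw [digitsRec, ih (PySem.Int.floordiv b 127)]
      simp

-- one block of A equals one block of B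
lemma block_eq (bsize block : Int) :
    ((PySem.List.pyRange 0 bsize 1).foldl
      (fun (st : Int × List Int) k =>
        (PySem.Int.floordiv st.1 127, st.2.set (bsize - k - 1).toNat (PySem.Int.mod st.1 127)))
      (block, List.replicate bsize.toNat 0)).2
    = List.replicate (bsize - ((lowLoopB block bsize.toNat).1.length : Int)).toNat
        (if (lowLoopB block bsize.toNat).2 = 0 then 0 else 126)
      ++ (lowLoopB block bsize.toNat).1.reverse := by
  rw [tmp_eq_digitsRec, digitsRec_eq_lowLoopB,
    show (bsize - ((lowLoopB block bsize.toNat).1.length : Int)).toNat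
        = bsize.toNat - (lowLoopB block bsize.toNat).1.length from by
      have := lowLoopB_length_le bsize.toNat block
      omega]

-- ===== VERDICT (by name: the statement is the Claim_ definition above) =====
theorem de_block_spec : Claim_equal_de_block := by
  intro blocks bsize _
  unfold Spec_de_block de_block de_block_alt
  rw [PySem.List.foldl_append_eq_flatMap, PySem.List.foldl_append_eq_flatMap]
  simp only [List.nil_append]
  congr 1
  funext block
  exact block_eq bsize block
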